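-- pv_equiv track=rewrite | github.com/Captainmorgan37/AirSprint-Tools | feasibility/schemas.py | combine_statuses
-- ===== SOURCE A (Python) =====
-- from typing import Dict, Iterable, List, Literal, Mapping, MutableMapping, Optional
--
-- CategoryStatus = Literal["PASS", "CAUTION", "FAIL"]
--
-- _STATUS_PRIORITY: Mapping[CategoryStatus, int] = {"PASS": 0, "CAUTION": 1, "FAIL": 2}
--
-- def combine_statuses(statuses: Iterable[CategoryStatus]) -> CategoryStatus:
--     """Return the most severe status contained in ``statuses``."""
--
--     worst: CategoryStatus = "PASS"
--     worst_score = _STATUS_PRIORITY[worst]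
--     for status in statuses:
--         score = _STATUS_PRIORITY.get(status, 0)
--         if score > worst_score:
--             worst = status  # type: ignore[assignment]
--             worst_score = score
--     return worst
-- ===== SOURCE B (Python) =====
-- def combine_statuses(statuses):
--     """Return the most severe status contained in ``statuses``."""
--     seen = set(statuses)
--     if "FAIL" in seen:
--         return "FAIL"
--     if "CAUTION" in seen:
--         return "CAUTION"
--     return "PASS"
-- ===== Notes on version B (the rewrite author's own statement) =====
-- stated objective: idiomatic
-- what changed: Replaces the running worst-score fold over a priority dict with a single set build followed by a fixed descending-severity membership chain (FAIL, CAUTION, PASS).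
import Mathlib
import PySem

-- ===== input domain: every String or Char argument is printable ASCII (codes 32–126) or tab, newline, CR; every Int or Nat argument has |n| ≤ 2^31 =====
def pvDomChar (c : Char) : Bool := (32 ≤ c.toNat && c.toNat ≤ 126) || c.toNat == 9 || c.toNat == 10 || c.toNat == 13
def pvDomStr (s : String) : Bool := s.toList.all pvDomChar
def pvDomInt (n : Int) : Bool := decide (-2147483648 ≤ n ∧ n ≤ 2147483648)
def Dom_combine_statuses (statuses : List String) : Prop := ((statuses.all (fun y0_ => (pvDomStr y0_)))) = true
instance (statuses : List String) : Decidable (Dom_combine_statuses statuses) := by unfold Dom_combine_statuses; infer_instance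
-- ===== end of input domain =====

-- B replaces A's running worst-score scan with one set build and a fixed
-- priority-ordered membership chain (objective: idiomatic; same cost).

-- ===== PORT A =====
-- _STATUS_PRIORITY = {"PASS": 0, "CAUTION": 1, "FAIL": 2}
def pvStatusPriority : PySem.Dict String Int :=
  PySem.Dict.ofList [("PASS", 0), ("CAUTION", 1), ("FAIL", 2)]

def combine_statuses (statuses : List String) : String :=
  -- worst = "PASS"; worst_score = _STATUS_PRIORITY[worst]  (= 0 on this literal dict)
  (statuses.foldl
    (fun (st : String × Int) status =>
      let score := pvStatusPriority.getD status 0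
      if score > st.2 then (status, score) else st)
    ("PASS", pvStatusPriority.getD "PASS" 0)).1

-- ===== PORT B =====
def combine_statuses_alt (statuses : List String) : String :=
  let seen : PySem.Set String := PySem.Set.ofList statuses
  if PySem.Set.contains seen "FAIL" then "FAIL"
  else if PySem.Set.contains seen "CAUTION" then "CAUTION"
  else "PASS"

-- ===== PRECONDITION & SPEC =====
def Spec_combine_statuses (statuses : List String) (out : String) : Prop := out = combine_statuses_alt statuses
instance (statuses : List String) (out : String) : Decidable (Spec_combine_statuses statuses out) := by unfold Spec_combine_statuses; infer_instance

-- ===== CLAIM (what is proved, stated in full; the proofs are below) =====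
def Claim_equal_combine_statuses : Prop := ∀ (statuses : List String), Dom_combine_statuses statuses → Spec_combine_statuses statuses (combine_statuses statuses)

-- ===== LEMMAS AND PROOFS =====

def pvStep (st : String × Int) (status : String) : String × Int :=
  let score := pvStatusPriority.getD status 0
  if score > st.2 then (status, score) else st

lemma pvScore (s : String) :
    pvStatusPriority.getD s 0 =
      if s = "FAIL" then 2 else if s = "CAUTION" then 1 else 0 := by
  have hmk : pvStatusPriority =
      PySem.Dict.mk [("PASS", 0), ("CAUTION", 1), ("FAIL", 2)] := by rfl
  by_cases hf : s = "FAIL"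
  · subst hf; decide
  by_cases hc : s = "CAUTION"
  · subst hc; decide
  by_cases hp : s = "PASS"
  · subst hp; decide
  simp [hmk, PySem.Dict.getD_eq_get?_getD, PySem.Dict.get?, Ne.symm hf, Ne.symm hc, Ne.symm hp, hf, hc]

lemma pvFold_fail (l : List String) : l.foldl pvStep ("FAIL", 2) = ("FAIL", 2) := by
  induction l with
  | nil => rfl
  | cons s l ih =>
    have : pvStep ("FAIL", 2) s = ("FAIL", 2) := by
      simp only [pvStep, pvScore]; split_ifs <;> simp_all
    simp [List.foldl, this, ih]

lemma pvFold_caution (l : List String) :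
    l.foldl pvStep ("CAUTION", 1) =
      if l.contains "FAIL" then ("FAIL", 2) else ("CAUTION", 1) := by
  induction l with
  | nil => rfl
  | cons s l ih =>
    by_cases hf : s = "FAIL"
    · subst hf
      have : pvStep ("CAUTION", 1) "FAIL" = ("FAIL", 2) := by
        simp [pvStep, pvScore]
      simp [List.foldl, this, pvFold_fail]
    · have : pvStep ("CAUTION", 1) s = ("CAUTION", 1) := by
        simp only [pvStep, pvScore]; split_ifs <;> simp_all
      simp [List.foldl, this, ih, Ne.symm hf]

lemma pvFold_pass (l : List String) :
    l.foldl pvStep ("PASS", 0) =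
      if l.contains "FAIL" then ("FAIL", 2)
      else if l.contains "CAUTION" then ("CAUTION", 1)
      else ("PASS", 0) := by
  induction l with
  | nil => rfl
  | cons s l ih =>
    by_cases hf : s = "FAIL"
    · subst hf
      have : pvStep ("PASS", 0) "FAIL" = ("FAIL", 2) := by simp [pvStep, pvScore]
      simp [List.foldl, this, pvFold_fail]
    · by_cases hc : s = "CAUTION"
      · subst hc
        have : pvStep ("PASS", 0) "CAUTION" = ("CAUTION", 1) := by
          simp [pvStep, pvScore]
        simp [List.foldl, this, pvFold_caution, Ne.symm hf]
      · have : pvStep ("PASS", 0) s = ("PASS", 0) := by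
          simp only [pvStep, pvScore]; split_ifs <;> simp_all
        simp [List.foldl, this, ih, Ne.symm hf, Ne.symm hc]

lemma pvSetContains (l : List String) (x : String) :
    PySem.Set.contains (PySem.Set.ofList l) x = l.contains x := by
  simp [PySem.Set.contains, PySem.Set.mem_ofList]

-- ===== VERDICT (by name: the statement is the Claim_ definition above) =====
theorem combine_statuses_spec : Claim_equal_combine_statuses := by
  intro statuses _
  unfold Spec_combine_statuses combine_statuses combine_statuses_alt
  have hinit : pvStatusPriority.getD "PASS" 0 = 0 := by decide
  show (statuses.foldl pvStep _).1 = _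
  rw [hinit, pvFold_pass]
  simp only [pvSetContains]
  split_ifs <;> rfl
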